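-- pv_equiv track=rewrite | github.com/yrod15x/Python | De Otros Py/Lineas Mayores/main.py | mayor_menor
-- ===== SOURCE A (Python) =====
-- def mayor_menor(lineas):
--     nueva_lineas = ""
--     num_caracteres = [len(c) for c in lineas]
--     for i, val in enumerate(lineas):
--         if i == num_caracteres.index(min(num_caracteres)):
--             nueva_lineas += (lineas[num_caracteres.index(max(num_caracteres))])
--         elif i == num_caracteres.index(max(num_caracteres)):
--             nueva_lineas+= (lineas[num_caracteres.index(min(num_caracteres))])
--         else:
--             nueva_lineas += val
--
--     return nueva_lineas
-- ===== SOURCE B (Python) =====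
-- def mayor_menor(lineas):
--     if not lineas:
--         return ""
--     lens = [len(s) for s in lineas]
--     i_min = lens.index(min(lens))
--     i_max = lens.index(max(lens))
--     copia = list(lineas)
--     copia[i_min], copia[i_max] = copia[i_max], copia[i_min]
--     return "".join(copia)
-- ===== Notes on version B (the rewrite author's own statement) =====
-- stated objective: faster
-- what changed: B computes the min/max length indices once, swaps the two lines in a copied list and joins, instead of A's per-element loop that recomputes min/max/index on every iteration and rebuilds the string by repeated concatenation.
import Mathlib
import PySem

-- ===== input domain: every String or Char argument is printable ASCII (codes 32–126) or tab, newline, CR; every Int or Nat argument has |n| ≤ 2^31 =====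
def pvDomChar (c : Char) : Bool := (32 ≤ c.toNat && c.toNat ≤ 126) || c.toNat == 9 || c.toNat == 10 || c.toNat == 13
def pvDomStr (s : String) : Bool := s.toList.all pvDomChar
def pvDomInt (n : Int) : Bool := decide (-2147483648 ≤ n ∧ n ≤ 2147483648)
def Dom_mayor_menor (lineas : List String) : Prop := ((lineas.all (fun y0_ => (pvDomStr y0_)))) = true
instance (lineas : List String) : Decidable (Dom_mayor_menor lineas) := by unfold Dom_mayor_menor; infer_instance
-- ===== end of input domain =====

-- B swaps the first-shortest and first-longest lines by two index lookups on a copied list and one join,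
-- instead of A's per-element loop that recomputes min/max and their indices on every iteration.

-- ===== PORT A =====
-- num_caracteres.index(min(num_caracteres)) as an Int (the .getD defaults are unreachable: inside the
-- loop the list is nonempty, so min?/index? always return some)
def pvIdxMinA (nums : List Int) : Int :=
  ((PySem.List.index? nums ((PySem.List.min? nums (fun x => x)).getD 0)).getD 0 : Nat)

def pvIdxMaxA (nums : List Int) : Int :=
  ((PySem.List.index? nums ((PySem.List.max? nums (fun x => x)).getD 0)).getD 0 : Nat)

def mayor_menor (lineas : List String) : String :=
  let num_caracteres : List Int := lineas.map (fun c => PySem.Str.len c)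
  String.ofList ((PySem.List.enumerate lineas).foldl (fun (acc : List Char) (iv : Int × String) =>
    if iv.1 = pvIdxMinA num_caracteres then
      acc ++ ((PySem.List.pyGet? lineas (pvIdxMaxA num_caracteres)).getD "").toList
    else if iv.1 = pvIdxMaxA num_caracteres then
      acc ++ ((PySem.List.pyGet? lineas (pvIdxMinA num_caracteres)).getD "").toList
    else
      acc ++ iv.2.toList) [])

-- ===== PORT B =====
def mayor_menor_alt (lineas : List String) : String :=
  if lineas = [] then "" else
  let lens : List Int := lineas.map (fun s => PySem.Str.len s)
  let iMin : Nat := (PySem.List.index? lens ((PySem.List.min? lens (fun x => x)).getD 0)).getD 0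
  let iMax : Nat := (PySem.List.index? lens ((PySem.List.max? lens (fun x => x)).getD 0)).getD 0
  let copia : List String :=
    (lineas.set iMin ((PySem.List.pyGet? lineas (iMax : Int)).getD "")).set iMax
      ((PySem.List.pyGet? lineas (iMin : Int)).getD "")
  PySem.Str.join "" copia

-- ===== PRECONDITION & SPEC =====
def Spec_mayor_menor (lineas : List String) (out : String) : Prop := out = mayor_menor_alt lineas
instance (lineas : List String) (out : String) : Decidable (Spec_mayor_menor lineas out) := by unfold Spec_mayor_menor; infer_instance

-- ===== CLAIM (what is proved, stated in full; the proofs are below) =====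
def Claim_equal_mayor_menor : Prop := ∀ (lineas : List String), Dom_mayor_menor lineas → Spec_mayor_menor lineas (mayor_menor lineas)

-- ===== LEMMAS AND PROOFS =====

theorem chars_join_nil_eq_flatten (xss : List (List Char)) :
    PySem.Chars.join [] xss = xss.flatten := by
  induction xss with
  | nil => simp [PySem.Chars.join_nil]
  | cons p rest ih =>
    cases rest with
    | nil => simp
    | cons q r => rw [PySem.Chars.join_cons_cons] at *; simp_all

theorem index?_lt_length {α : Type} [BEq α] [LawfulBEq α] {xs : List α} {v : α} {k : Nat}
    (h : PySem.List.index? xs v = some k) : k < xs.length ∧ xs[k]'(by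
      rcases (PySem.List.index?_eq_some_iff _ _ _).1 h with ⟨pre, suf, hx, hl, _⟩
      subst hx; simp [← hl]) = v := by
  rcases (PySem.List.index?_eq_some_iff _ _ _).1 h with ⟨pre, suf, hx, hl, _⟩
  subst hx
  constructor
  · simp [← hl]
  · subst hl; simp

theorem mayor_menor_spec : Claim_equal_mayor_menor := by
  intro lineas _
  unfold Spec_mayor_menor mayor_menor mayor_menor_alt
  by_cases hnil : lineas = []
  · subst hnil; rfl
  · simp only [if_neg hnil]
    set nums : List Int := lineas.map (fun c => PySem.Str.len c) with hnums
    have hnumsne : nums ≠ [] := by simpa [hnums] using hnil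
    -- min and max exist
    obtain ⟨mn, hmn⟩ : ∃ m, PySem.List.min? nums (fun x => x) = some m := by
      cases h : PySem.List.min? nums (fun x => x) with
      | none => exact absurd ((PySem.List.min?_eq_none_iff _ _).1 h) hnumsne
      | some m => exact ⟨m, rfl⟩
    obtain ⟨mx, hmx⟩ : ∃ m, PySem.List.max? nums (fun x => x) = some m := by
      cases h : PySem.List.max? nums (fun x => x) with
      | none => exact absurd ((PySem.List.max?_eq_none_iff _ _).1 h) hnumsne
      | some m => exact ⟨m, rfl⟩
    obtain ⟨kmin, hkmin⟩ : ∃ k, PySem.List.index? nums mn = some k := by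
      have := (PySem.List.index?_isSome_iff nums mn).2 (PySem.List.min?_mem hmn)
      exact ⟨(PySem.List.index? nums mn).get this, (Option.some_get this).symm⟩
    obtain ⟨kmax, hkmax⟩ : ∃ k, PySem.List.index? nums mx = some k := by
      have := (PySem.List.index?_isSome_iff nums mx).2 (PySem.List.max?_mem hmx)
      exact ⟨(PySem.List.index? nums mx).get this, (Option.some_get this).symm⟩
    have hkminlt : kmin < lineas.length := by
      have := (index?_lt_length hkmin).1; simpa [hnums] using this
    have hkmaxlt : kmax < lineas.length := by
      have := (index?_lt_length hkmax).1; simpa [hnums] using this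
    have hImin : pvIdxMinA nums = (kmin : Int) := by
      simp only [pvIdxMinA, hmn, Option.getD_some, hkmin]
    have hImax : pvIdxMaxA nums = (kmax : Int) := by
      simp only [pvIdxMaxA, hmx, Option.getD_some, hkmax]
    have hgmin : (PySem.List.pyGet? lineas (kmin : Int)).getD "" = lineas[kmin] := by
      simp [PySem.List.pyGet?_natCast, List.getElem?_eq_getElem hkminlt]
    have hgmax : (PySem.List.pyGet? lineas (kmax : Int)).getD "" = lineas[kmax] := by
      simp [PySem.List.pyGet?_natCast, List.getElem?_eq_getElem hkmaxlt]
    -- rewrite the fold as a flatMap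
    have hfold :
        (PySem.List.enumerate lineas).foldl (fun (acc : List Char) (iv : Int × String) =>
          if iv.1 = pvIdxMinA nums then
            acc ++ ((PySem.List.pyGet? lineas (pvIdxMaxA nums)).getD "").toList
          else if iv.1 = pvIdxMaxA nums then
            acc ++ ((PySem.List.pyGet? lineas (pvIdxMinA nums)).getD "").toList
          else
            acc ++ iv.2.toList) [] =
        (PySem.List.enumerate lineas).flatMap (fun (iv : Int × String) =>
          if iv.1 = pvIdxMinA nums then
            ((PySem.List.pyGet? lineas (pvIdxMaxA nums)).getD "").toList
          else if iv.1 = pvIdxMaxA nums then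
            ((PySem.List.pyGet? lineas (pvIdxMinA nums)).getD "").toList
          else
            iv.2.toList) := by
      have hfun : (fun (acc : List Char) (iv : Int × String) =>
          if iv.1 = pvIdxMinA nums then
            acc ++ ((PySem.List.pyGet? lineas (pvIdxMaxA nums)).getD "").toList
          else if iv.1 = pvIdxMaxA nums then
            acc ++ ((PySem.List.pyGet? lineas (pvIdxMinA nums)).getD "").toList
          else
            acc ++ iv.2.toList) =
          (fun (acc : List Char) (iv : Int × String) => acc ++
            (if iv.1 = pvIdxMinA nums then
              ((PySem.List.pyGet? lineas (pvIdxMaxA nums)).getD "").toList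
            else if iv.1 = pvIdxMaxA nums then
              ((PySem.List.pyGet? lineas (pvIdxMinA nums)).getD "").toList
            else
              iv.2.toList)) := by
        funext acc iv; split_ifs <;> rfl
      rw [hfun, PySem.List.foldl_append_eq_flatMap]
      simp
    rw [hfold, PySem.Str.join]
    simp only [hmn, hmx, Option.getD_some, hkmin, hkmax]
    apply congrArg String.ofList
    rw [show ("" : String).toList = [] from rfl, chars_join_nil_eq_flatten, List.flatMap_def]
    apply congrArg List.flatten
    -- elementwise equality of the mapped lists
    apply List.ext_getElem
    · simp [PySem.List.length_enumerate]
    · intro i h1 h2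
      rw [List.getElem_map, List.getElem_map]
      rw [PySem.List.getElem_enumerate]
      simp only [hImin, hImax, hgmin, hgmax]
      have hcastmin : ((0 : Int) + (i : Int) = (kmin : Int)) ↔ i = kmin := by omega
      have hcastmax : ((0 : Int) + (i : Int) = (kmax : Int)) ↔ i = kmax := by omega
      simp only [List.getElem_set]
      by_cases h3 : i = kmax
      · subst h3
        by_cases h4 : i = kmin
        · have : kmin = i := h4.symm
          simp [← this]
        · simp [hcastmax.2 rfl, hcastmin, h4, hgmin]
      · by_cases h4 : i = kmin
        · subst h4
          have hne : ¬ (kmax = i) := fun h => h3 h.symm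
          simp [hcastmin.2 rfl, hne, hgmax]
        · have hne3 : ¬ (kmax = i) := fun h => h3 h.symm
          have hne4 : ¬ (kmin = i) := fun h => h4 h.symm
          simp [hcastmin, hcastmax, h3, h4, hne3, hne4]
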